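-- pv_equiv track=rewrite | github.com/glomatico/votify | votify/utils.py | generate_secret_key
-- ===== SOURCE A (Python) =====
-- def generate_secret_key(arr: list):
--     """
--     I'd prefer to keep these close to the original code, so
--     we can debug if/when spotify changes their code. Logic obtained from:
--     https://open.spotifycdn.com/cdn/build/web-player/web-player.<HASH>.js
--     """
--     def Ee(e):
--         """
--         Convert hex string to bytes
--         Original code:
--         Ee = e => {
--             e = e.replace(/ /g, "");
--             const t = new ArrayBuffer(e.length / 2)
--             , n = new Uint8Array(t);
--             for (let r = 0; r < e.length; r += 2)
--                 n[r / 2] = parseInt(e.substring(r, r + 2), 16);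
--             return n
--         }
--         """
--         e = e.replace(" ", "")
--         n = [0] * (len(e) // 2)
--         for r in range(0, len(e), 2):
--             n[r // 2] = int(e[r:r + 2], 16)
--         return n
--
--     class xe:
--         def __init__(self, options):
--             self.buffer = options.get('buffer')
--
--         @classmethod
--         def fromHex(cls, e):
--             return cls({
--                 'buffer': Ee(e)
--             })
--
--         def __repr__(self):
--             return f'xe(buffer={self.buffer})'
--
--     class Ne:
--         @staticmethod
--         def _from(e, t = 'utf-8'):
--             '''
--             e is the buffer
--             t is utf8
--             '''
--             if type(e) == str:
--                 return [ord(char) for char in e]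
--             raise NotImplementedError
--
--     def Pe(e):
--         '''
--         Obfuscate the secret key - this could change in the future
--         Original code:
--         function Pe(e) {
--             const t = e.map(( (e, t) => e ^ t % 33 + 9))
--                 , n = Ne.from(t.join(""), "utf8").toString("hex"); // [Calculating n]
--             return xe.fromHex(n) // [Calculating xe.fromHex(n)]
--         }
--         '''
--         t = [element ^ (idx % 33 + 9) for idx, element in enumerate(e)]
--
--         n = Ne._from(''.join(map(str, t)), 'utf-8')
--         n = bytes(n).hex()
--
--         return xe.fromHex(n)
--
--     return Pe(arr).buffer
-- ===== SOURCE B (Python) =====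
-- def generate_secret_key(arr: list):
--     # Pure arithmetic: extract each value's decimal-digit ASCII codes by divmod,
--     # least-significant first, building the output back-to-front over the reversed
--     # input, then reverse once.  No string conversion, no hex roundtrip.
--     out = []
--     i = len(arr) - 1
--     for e in reversed(arr):
--         x = e ^ (i % 33 + 9)
--         if x < 0:
--             x = -x
--             sign = True
--         else:
--             sign = False
--         if x == 0:
--             out.append(48)
--         else:
--             while x:
--                 out.append(48 + x % 10)
--                 x //= 10
--         if sign:
--             out.append(45)
--         i -= 1
--     out.reverse()
--     return out
-- ===== Notes on version B (the rewrite author's own statement) =====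
-- stated objective: alternative
-- what changed: B replaces A's string/hex pipeline (str() per element, join, ord, bytes().hex(), hex re-parse) by pure arithmetic: it extracts each XOR-ed value's decimal-digit ASCII codes by repeated divmod, least-significant digit first, iterating the input in reverse and reversing the accumulated output once at the end; no strings and no hex roundtrip.
import Mathlib
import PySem

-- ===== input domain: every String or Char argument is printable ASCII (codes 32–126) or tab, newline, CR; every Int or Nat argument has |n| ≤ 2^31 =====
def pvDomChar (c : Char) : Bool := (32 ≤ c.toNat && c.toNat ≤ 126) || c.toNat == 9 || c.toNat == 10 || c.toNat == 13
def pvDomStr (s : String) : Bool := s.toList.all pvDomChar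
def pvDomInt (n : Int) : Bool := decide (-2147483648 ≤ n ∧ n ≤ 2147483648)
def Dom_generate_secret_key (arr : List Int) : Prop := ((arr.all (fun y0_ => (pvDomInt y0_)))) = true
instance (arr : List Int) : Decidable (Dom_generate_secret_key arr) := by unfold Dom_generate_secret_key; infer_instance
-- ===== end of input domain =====

-- B replaces A's string/hex pipeline by pure arithmetic: per element it extracts decimal-digit
-- ASCII codes by repeated divmod (least-significant first), building the output back-to-front
-- over the reversed input and reversing once; same return value, no strings and no hex roundtrip.


-- ===== PORT A =====
-- one hex digit of bytes(...).hex(); exact for 0 ≤ b < 256, which is the only use here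
def pvHexDig (d : Nat) : Char := if d < 10 then Char.ofNat (48 + d) else Char.ofNat (87 + d)

-- bytes([b]).hex() for one byte
def pvByteHex (b : Int) : List Char := [pvHexDig (b.toNat / 16), pvHexDig (b.toNat % 16)]

-- Ee's loop 'for r in range(0, len(e), 2): n[r//2] = int(e[r:r+2], 16)', consuming the two
-- chars e[r:r+2] per step (exact: the hex string fed to Ee has even length); int(s,16) is
-- PySem.Int.ofCharsBase?; '.getD 0' only totalises the never-reached ValueError branch
def pvParseHexPairs : List Char → List Int
  | c1 :: c2 :: rest => (PySem.Int.ofCharsBase? [c1, c2] 16).getD 0 :: pvParseHexPairs rest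
  | _ => []

-- Ee: e.replace(" ", "") then parse hex pairs
def pvEe (e : List Char) : List Int := pvParseHexPairs (PySem.Chars.replace e [' '] [])

def generate_secret_key (arr : List Int) : List Int :=
  -- t = [element ^ (idx % 33 + 9) for idx, element in enumerate(arr)]
  let t := (PySem.List.enumerate arr 0).map (fun p => PySem.Int.bxor p.2 (PySem.Int.mod p.1 33 + 9))
  -- n = Ne._from(''.join(map(str, t))) : the ord of each char of the joined string
  let n := (PySem.Chars.join [] (t.map PySem.Int.toChars)).map (fun c => (c.toNat : Int))
  -- n = bytes(n).hex()
  let hex := n.flatMap pvByteHex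
  -- return xe.fromHex(hex).buffer = Ee(hex)
  pvEe hex

-- ===== PORT B =====
-- the inner 'while x: out.append(48 + x % 10); x //= 10' loop (x > 0 here, so '//' = Nat '/')
def pvDigitsRevLoop : Nat → List Int → List Int
  | 0, out => out
  | n + 1, out => pvDigitsRevLoop ((n + 1) / 10) (out ++ [(48 : Int) + (((n + 1) % 10 : Nat) : Int)])
  termination_by n _ => n
  decreasing_by exact Nat.div_lt_self (Nat.succ_pos _) (by omega)

-- the body of B's for-loop for one value x = e ^ (i % 33 + 9)
def pvEmit (out : List Int) (x : Int) : List Int :=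
  let p := if x < 0 then (-x, true) else (x, false)
  let out := if p.1 = 0 then out ++ [48] else pvDigitsRevLoop p.1.toNat out
  if p.2 then out ++ [45] else out

-- one iteration of 'for e in reversed(arr)': state is (i, out), with 'i -= 1' at the end
def pvStep (st : Int × List Int) (e : Int) : Int × List Int :=
  (st.1 - 1, pvEmit st.2 (PySem.Int.bxor e (PySem.Int.mod st.1 33 + 9)))

def generate_secret_key_alt (arr : List Int) : List Int :=
  ((arr.reverse.foldl pvStep ((arr.length : Int) - 1, [])).2).reverse

-- ===== PRECONDITION & SPEC =====
def Spec_generate_secret_key (arr : List Int) (out : List Int) : Prop := out = generate_secret_key_alt arr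
instance (arr : List Int) (out : List Int) : Decidable (Spec_generate_secret_key arr out) := by unfold Spec_generate_secret_key; infer_instance

-- ===== CLAIM (what is proved, stated in full; the proofs are below) =====
def Claim_equal_generate_secret_key : Prop := ∀ (arr : List Int), Dom_generate_secret_key arr → Spec_generate_secret_key arr (generate_secret_key arr)

-- ===== LEMMAS AND PROOFS =====

-- the ASCII codes of str(x), as Ne._from computes them
def pvCodes (x : Int) : List Int := (PySem.Int.toChars x).map (fun c => (c.toNat : Int))

-- ''.join = flatten
theorem pv_join_nil (xss : List (List Char)) : PySem.Chars.join [] xss = xss.flatten := by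
  induction xss with
  | nil => rfl
  | cons x xs ih =>
    simp only [PySem.Chars.join, List.intercalate] at *
    cases xs <;> simp_all [List.intersperse]

-- every char str(n) produces has code 45–57 ('-' and the decimal digits)
theorem pv_toDigitsCore_mem (f : Nat) : ∀ (n : Nat) (ds : List Char) (c : Char),
    c ∈ Nat.toDigitsCore 10 f n ds → c ∈ ds ∨ (48 ≤ c.toNat ∧ c.toNat ≤ 57) := by
  induction f with
  | zero => intro n ds c hc; exact Or.inl hc
  | succ f ih =>
    intro n ds c hc
    rw [Nat.toDigitsCore] at hc
    have h10 : n % 10 < 10 := Nat.mod_lt _ (by omega)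
    have hd : 48 ≤ (n % 10).digitChar.toNat ∧ (n % 10).digitChar.toNat ≤ 57 := by
      set m := n % 10 with hm
      interval_cases m <;> decide
    by_cases h : n / 10 = 0
    · simp only [h] at hc
      rcases List.mem_cons.mp hc with h1 | h1
      · exact Or.inr (h1 ▸ hd)
      · exact Or.inl h1
    · simp only [if_neg h] at hc
      rcases ih _ _ _ hc with h1 | h1
      · rcases List.mem_cons.mp h1 with h2 | h2
        · exact Or.inr (h2 ▸ hd)
        · exact Or.inl h2
      · exact Or.inr h1

theorem pv_toChars_mem (x : Int) (c : Char) (hc : c ∈ PySem.Int.toChars x) :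
    45 ≤ c.toNat ∧ c.toNat ≤ 57 := by
  unfold PySem.Int.toChars at hc
  split at hc
  · rcases List.mem_cons.mp hc with h | h
    · subst h; decide
    · rcases pv_toDigitsCore_mem _ _ _ _ h with h1 | h1
      · simp at h1
      · omega
  · rcases pv_toDigitsCore_mem _ _ _ _ hc with h1 | h1
    · simp at h1
    · omega

-- int(two lowercase hex digits, 16)
theorem pv_hexpair (x y : Nat) (hx : x < 16) (hy : y < 16) :
    PySem.Int.ofCharsBase? [pvHexDig x, pvHexDig y] 16 = some ((16 * x + y : Nat) : Int) := by
  interval_cases x <;> interval_cases y <;> decide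

theorem pv_hexDig_ne_space (d : Nat) (hd : d < 16) : pvHexDig d ≠ ' ' := by
  interval_cases d <;> decide

-- replace " " "" is the identity when there is no space
theorem pv_replace_go (fuel : Nat) : ∀ (l acc : List Char), ' ' ∉ l →
    PySem.Chars.replace.go [' '] [] fuel l acc = acc.reverse ++ l := by
  induction fuel with
  | zero => intro l acc _; rw [PySem.Chars.replace.go]
  | succ f ih =>
    intro l acc hl
    cases l with
    | nil => rw [PySem.Chars.replace.go]; simp; omega
    | cons c t =>
      rw [PySem.Chars.replace.go]
      have hc : c ≠ ' ' := fun h => hl (h ▸ List.mem_cons_self ..)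
      have hpre : List.isPrefixOf [' '] (c :: t) = false := by
        simp only [List.isPrefixOf, Bool.and_true]
        exact decide_eq_false fun h => hc h.symm
      simp only [hpre, Bool.false_eq_true, if_false]
      rw [ih t (c :: acc) (fun h => hl (List.mem_cons_of_mem _ h))]
      simp

theorem pv_replace_id (l : List Char) (h : ' ' ∉ l) :
    PySem.Chars.replace l [' '] [] = l := by
  unfold PySem.Chars.replace
  simp only [show ([' '] : List Char).isEmpty = false from rfl, Bool.false_eq_true, if_false]
  rw [pv_replace_go _ _ _ h]
  rfl

-- hex-encode then hex-decode is the identity on byte lists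
theorem pv_roundtrip (bs : List Int) (h : ∀ b ∈ bs, 0 ≤ b ∧ b < 256) :
    pvParseHexPairs (bs.flatMap pvByteHex) = bs := by
  induction bs with
  | nil => rfl
  | cons b bs ih =>
    have hb := h b (List.mem_cons_self ..)
    have h16 : b.toNat / 16 < 16 := by omega
    have h16' : b.toNat % 16 < 16 := Nat.mod_lt _ (by omega)
    simp only [List.flatMap_cons, pvByteHex, List.cons_append, List.nil_append,
      pvParseHexPairs, pv_hexpair _ _ h16 h16', Option.getD_some]
    rw [ih (fun x hx => h x (List.mem_cons_of_mem _ hx))]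
    congr 1
    have : 16 * (b.toNat / 16) + b.toNat % 16 = b.toNat := by omega
    rw [this]; omega

-- A's whole pipeline after the XOR map is 'the ASCII codes of the joined decimal strings'
theorem pv_pipeline (t : List Int) :
    pvEe (((PySem.Chars.join [] (t.map PySem.Int.toChars)).map
        (fun c => (c.toNat : Int))).flatMap pvByteHex) = t.flatMap pvCodes := by
  set n : List Int :=
      (PySem.Chars.join [] (t.map PySem.Int.toChars)).map (fun c => (c.toNat : Int)) with hn
  have hmem : ∀ b ∈ n, 0 ≤ b ∧ b < 256 := by
    intro b hb
    rw [hn] at hb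
    rcases List.mem_map.mp hb with ⟨c, hc, rfl⟩
    rw [pv_join_nil] at hc
    rcases List.mem_flatten.mp hc with ⟨cs, hcs, hcmem⟩
    rcases List.mem_map.mp hcs with ⟨x, _, rfl⟩
    have := pv_toChars_mem x c hcmem
    omega
  have hnospace : ' ' ∉ n.flatMap pvByteHex := by
    intro hsp
    rcases List.mem_flatMap.mp hsp with ⟨b, hb, hcb⟩
    have hb' := hmem b hb
    simp only [pvByteHex, List.mem_cons, List.not_mem_nil, or_false] at hcb
    rcases hcb with h1 | h1
    · exact pv_hexDig_ne_space _ (by omega) h1.symm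
    · exact pv_hexDig_ne_space _ (Nat.mod_lt _ (by omega)) h1.symm
  rw [pvEe, pv_replace_id _ hnospace, pv_roundtrip _ hmem, hn, pv_join_nil]
  simp only [List.flatMap_def, List.map_flatten, List.map_map, Function.comp_def]
  rfl

-- ---- B-side characterisation ----

-- the accumulator of the digit loop factors out
theorem pvDigitsRevLoop_acc (n : Nat) : ∀ out, pvDigitsRevLoop n out = out ++ pvDigitsRevLoop n [] := by
  induction n using Nat.strong_induction_on with
  | _ n ih =>
    cases n with
    | zero => intro out; simp [pvDigitsRevLoop]
    | succ m =>
      intro out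
      rw [pvDigitsRevLoop, pvDigitsRevLoop,
        ih _ (Nat.div_lt_self (Nat.succ_pos m) (by omega)) (out ++ _),
        ih _ (Nat.div_lt_self (Nat.succ_pos m) (by omega)) ([] ++ _)]
      simp

theorem pv_digitChar_code (d : Nat) (hd : d < 10) : ((Nat.digitChar d).toNat : Int) = 48 + d := by
  interval_cases d <;> decide

-- the digit loop produces exactly the reversed decimal digit codes
theorem pv_tdc (f : Nat) : ∀ (n : Nat) (ds : List Char), 0 < n → n < 10 ^ f →
    (Nat.toDigitsCore 10 f n ds).map (fun c => (c.toNat : Int)) =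
      (pvDigitsRevLoop n []).reverse ++ ds.map (fun c => (c.toNat : Int)) := by
  induction f with
  | zero => intro n ds hn hf; simp at hf; omega
  | succ f ih =>
    intro n ds hn hf
    obtain ⟨m, rfl⟩ : ∃ m, n = m + 1 := ⟨n - 1, by omega⟩
    have hmod : (m + 1) % 10 < 10 := Nat.mod_lt _ (by omega)
    rw [Nat.toDigitsCore, pvDigitsRevLoop]
    by_cases h : (m + 1) / 10 = 0
    · rw [h, pvDigitsRevLoop]
      simp [pv_digitChar_code _ hmod]
    · rw [if_neg h, pvDigitsRevLoop_acc,
        ih _ _ (Nat.pos_of_ne_zero h) ((Nat.div_lt_iff_lt_mul (by omega)).mpr (by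
          have he : (10 : Nat) ^ (f + 1) = 10 ^ f * 10 := by ring
          omega))]
      simp [pv_digitChar_code _ hmod]

theorem pv_fuel (n : Nat) : n < 10 ^ (n + 1) := by
  calc n < 2 ^ n := Nat.lt_two_pow_self
    _ ≤ 10 ^ n := Nat.pow_le_pow_left (by omega) n
    _ ≤ 10 ^ (n + 1) := Nat.pow_le_pow_right (by omega) (by omega)

-- one loop body appends the reversed ASCII codes of str(x)
theorem pv_emit_eq (out : List Int) (x : Int) :
    pvEmit out x = out ++ (pvCodes x).reverse := by
  unfold pvEmit pvCodes PySem.Int.toChars Nat.toDigits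
  by_cases hx : x < 0
  · have h1 : ¬ (-x = 0) := by omega
    have h2 : 0 < (-x).toNat := by omega
    have hab : x.natAbs = (-x).toNat := by omega
    simp only [if_pos hx, h1, List.map_cons, List.reverse_cons, hab]
    rw [pvDigitsRevLoop_acc, pv_tdc _ _ _ h2 (pv_fuel _)]
    simp
  · by_cases h0 : x = 0
    · subst h0
      simp only [Nat.toDigitsCore]
      norm_num [pv_digitChar_code 0 (by omega)]
    · have h2 : 0 < x.toNat := by omega
      simp only [if_neg hx, if_neg (by simpa using h0)]
      rw [pvDigitsRevLoop_acc, pv_tdc _ _ _ h2 (pv_fuel _)]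
      simp

-- contributions of the reversed loop, head element processed last with index k - as.length
def pvR : List Int → Int → List Int
  | [], _ => []
  | a :: as, k =>
      pvR as k ++ (pvCodes (PySem.Int.bxor a (PySem.Int.mod (k - as.length) 33 + 9))).reverse

theorem pv_fold (arr : List Int) : ∀ (k : Int) (out : List Int),
    arr.reverse.foldl pvStep (k, out) = (k - arr.length, out ++ pvR arr k) := by
  induction arr with
  | nil => intro k out; simp [pvR]
  | cons a as ih =>
    intro k out
    rw [List.reverse_cons, List.foldl_append, ih]
    simp only [List.foldl_cons, List.foldl_nil, pvStep, pvR]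
    rw [pv_emit_eq]
    simp only [Prod.mk.injEq]
    refine ⟨by push_cast [List.length_cons]; ring, by simp⟩

theorem pv_R_rev (arr : List Int) : ∀ (k : Int),
    (pvR arr k).reverse =
      (PySem.List.enumerate arr (k + 1 - arr.length)).flatMap
        (fun p => pvCodes (PySem.Int.bxor p.2 (PySem.Int.mod p.1 33 + 9))) := by
  induction arr with
  | nil => intro k; simp [pvR]
  | cons a as ih =>
    intro k
    rw [pvR, List.reverse_append, List.reverse_reverse, PySem.List.enumerate_cons,
      List.flatMap_cons, ih k]
    have h1 : k + 1 - ((a :: as).length : Int) = k - as.length := by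
      push_cast [List.length_cons]; ring
    rw [h1, show k - (as.length : Int) + 1 = k + 1 - as.length from by ring]

theorem generate_secret_key_eq (arr : List Int) :
    generate_secret_key arr = generate_secret_key_alt arr := by
  unfold generate_secret_key generate_secret_key_alt
  rw [pv_fold, pv_pipeline]
  simp only [List.nil_append]
  rw [pv_R_rev]
  have : (arr.length : Int) - 1 + 1 - arr.length = 0 := by ring
  rw [this, List.flatMap_map]

-- ===== VERDICT (by name: the statement is the Claim_ definition above) =====
theorem generate_secret_key_spec : Claim_equal_generate_secret_key := by
  intro arr _
  unfold Spec_generate_secret_key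
  exact generate_secret_key_eq arr
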